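-- pv_equiv track=rewrite | github.com/bigov/daft-lib | Python/src-archiv/myApp/tricks.py | compress_IxI
-- ===== SOURCE A (Python) =====
-- def compress_IxI(m):
--     ''' Кодирует 2d матрицу IxI координат в сжатый список для хранения
--         в базе данных
--     '''
--     line = []
--     for r in range(len(m)):
--         line += m[r]
--
--     curr = line[0]
--     rez = [0] if curr == 0 else []
--
--     i = 0
--     for n in range(len(line)):
--         if curr == line[n]:
--             i += 1
--         else:
--             rez.append(i)
--             i = 1
--             curr = line[n]
--
--     return rez
-- ===== SOURCE B (Python) =====
-- def compress_IxI(m):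
--     ''' Encode a 2d IxI coordinate matrix into a compressed list, via change
--         positions: run lengths are the gaps between adjacent unequal pairs.
--     '''
--     flat = [x for row in m for x in row]
--     prefix = [0] if flat[0] == 0 else []
--     bounds = [i for i in range(1, len(flat)) if flat[i] != flat[i - 1]]
--     return prefix + [b - a for a, b in zip([0] + bounds, bounds)]
-- ===== Notes on version B (the rewrite author's own statement) =====
-- stated objective: alternative
-- what changed: Instead of A's stateful single pass carrying (current value, running count, output) and appending at each change, B flattens with a comprehension, collects the change positions with a filtered range, and returns the run lengths as the successive differences of those positions; the dropped final run falls out because positions only mark changes.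
import Mathlib
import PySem

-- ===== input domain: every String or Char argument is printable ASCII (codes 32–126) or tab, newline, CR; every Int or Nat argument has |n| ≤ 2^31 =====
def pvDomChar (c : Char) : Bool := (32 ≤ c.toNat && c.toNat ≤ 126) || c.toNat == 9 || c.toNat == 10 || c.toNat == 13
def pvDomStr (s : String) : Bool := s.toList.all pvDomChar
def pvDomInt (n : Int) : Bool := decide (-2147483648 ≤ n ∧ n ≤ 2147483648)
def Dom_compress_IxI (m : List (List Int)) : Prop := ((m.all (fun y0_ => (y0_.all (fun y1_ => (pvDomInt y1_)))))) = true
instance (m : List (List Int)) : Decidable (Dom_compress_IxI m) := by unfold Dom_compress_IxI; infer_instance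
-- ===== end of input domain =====

-- B replaces A's stateful run-length pass by change positions + successive differences (alternative decomposition, same cost).

-- ===== PORT A =====
-- the body of A's second loop, taking the current element line[n]
def stepA (st : List Int × Int × Int) (x : Int) : List Int × Int × Int :=
  if st.2.2 = x then (st.1, st.2.1 + 1, st.2.2) else (st.1 ++ [st.2.1], 1, x)

def compress_IxI (m : List (List Int)) : List Int :=
  let line := (PySem.List.pyRange 0 m.length 1).foldl
    (fun acc r => acc ++ PySem.List.pyGetD m r []) []
  match PySem.List.pyGet? line 0 with
  | none => []   -- line[0] raises IndexError; excluded by Pre_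
  | some curr0 =>
    let rez0 : List Int := if curr0 = 0 then [0] else []
    let st := (PySem.List.pyRange 0 (line.length : Int) 1).foldl
      (fun st n => stepA st (PySem.List.pyGetD line n 0)) (rez0, (0 : Int), curr0)
    st.1

-- ===== PORT B =====
def compress_IxI_alt (m : List (List Int)) : List Int :=
  let flat := m.flatMap (fun row => row)
  match PySem.List.pyGet? flat 0 with
  | none => []   -- flat[0] raises IndexError; excluded by Pre_
  | some f0 =>
    let pre : List Int := if f0 = 0 then [0] else []
    let bounds := (PySem.List.pyRange 1 (flat.length : Int) 1).filter
      (fun i => PySem.List.pyGetD flat i 0 ≠ PySem.List.pyGetD flat (i - 1) 0)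
    pre ++ (((0 : Int) :: bounds).zip bounds).map (fun p => p.2 - p.1)

-- ===== PRECONDITION & SPEC =====
-- A evaluates line[0]; on an empty flattened matrix this raises IndexError (B raises there too).
def Pre_compress_IxI (m : List (List Int)) : Prop := m.flatten ≠ []
instance (m : List (List Int)) : Decidable (Pre_compress_IxI m) := by unfold Pre_compress_IxI; infer_instance
def pvWitness_compress_IxI : List (List Int) := [[0, 0, 1]]

def Spec_compress_IxI (m : List (List Int)) (out : List Int) : Prop := out = compress_IxI_alt m
instance (m : List (List Int)) (out : List Int) : Decidable (Spec_compress_IxI m out) := by unfold Spec_compress_IxI; infer_instance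

-- ===== CLAIM (what is proved, stated in full; the proofs are below) =====
def Claim_equal_compress_IxI : Prop := ∀ (m : List (List Int)), Dom_compress_IxI m → Pre_compress_IxI m → Spec_compress_IxI m (compress_IxI m)

-- ===== LEMMAS AND PROOFS =====

-- run lengths (last run dropped) as A's loop produces them, element-wise
def gRuns (curr : Int) (i : Int) : List Int → List Int
  | [] => []
  | x :: xs => if curr = x then gRuns curr (i + 1) xs else i :: gRuns x 1 xs

-- absolute positions of changes, scanning xs with previous element prev at position pos
def chPos (prev : Int) : List Int → Int → List Int
  | [], _ => []
  | x :: xs, pos => (if x ≠ prev then [pos] else []) ++ chPos x xs (pos + 1)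

-- successive differences with base a
def dffs (a : Int) : List Int → List Int
  | [] => []
  | b :: bs => (b - a) :: dffs b bs

theorem zip_diff_eq_dffs : ∀ (bs : List Int) (a : Int),
    ((a :: bs).zip bs).map (fun p => p.2 - p.1) = dffs a bs
  | [], a => rfl
  | b :: bs, a => by
    rw [List.zip_cons_cons, List.map_cons, zip_diff_eq_dffs bs b]
    rfl

theorem foldA_eq_gRuns (l : List Int) : ∀ (rez : List Int) (i curr : Int),
    (l.foldl stepA (rez, i, curr)).1 = rez ++ gRuns curr i l := by
  induction l with
  | nil => intro rez i curr; simp [gRuns]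
  | cons x xs ih =>
    intro rez i curr
    by_cases h : curr = x <;> simp [stepA, gRuns, h, ih]

theorem dffs_chPos (l : List Int) : ∀ (prev s pos : Int),
    dffs s (chPos prev l pos) = gRuns prev (pos - s) l := by
  induction l with
  | nil => intro prev s pos; rfl
  | cons x xs ih =>
    intro prev s pos
    by_cases h : prev = x
    · simp [chPos, gRuns, h, ih x s (pos + 1)]
      have : pos + 1 - s = pos - s + 1 := by ring
      rw [this]
    · simp [chPos, gRuns, h, Ne.symm h, dffs, ih x pos (pos + 1)]

theorem foldl_acc_flatten (m : List (List Int)) : ∀ (acc : List Int),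
    m.foldl (fun a r => a ++ r) acc = acc ++ m.flatten := by
  induction m with
  | nil => simp
  | cons r rs ih => intro acc; simp [ih]

theorem filter_range_eq_chPos (xs : List Int) :
    ∀ (pre : List Int) (prev : Int), pre ≠ [] → pre.getLast? = some prev →
    (PySem.List.pyRange (pre.length : Int) (((pre ++ xs).length : Nat) : Int) 1).filter
      (fun i => PySem.List.pyGetD (pre ++ xs) i 0 ≠ PySem.List.pyGetD (pre ++ xs) (i - 1) 0)
      = chPos prev xs (pre.length : Int) := by
  induction xs with
  | nil =>
    intro pre prev _ _
    rw [PySem.List.pyRange_one_eq_nil (by simp)]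
    rfl
  | cons x xs ih =>
    intro pre prev hne hlast
    have hlen : 0 < pre.length := List.length_pos_iff.mpr hne
    have hcons : (PySem.List.pyRange (pre.length : Int) (((pre ++ x :: xs).length : Nat) : Int) 1)
        = (pre.length : Int) :: PySem.List.pyRange ((pre.length : Int) + 1) (((pre ++ x :: xs).length : Nat) : Int) 1 := by
      apply PySem.List.pyRange_one_cons
      simp
    have hget1 : PySem.List.pyGetD (pre ++ x :: xs) (pre.length : Int) 0 = x := by
      simp [PySem.List.pyGetD_natCast, List.getD_eq_getElem?_getD]
    have hget0 : PySem.List.pyGetD (pre ++ x :: xs) ((pre.length : Int) - 1) 0 = prev := by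
      have hc : (pre.length : Int) - 1 = ((pre.length - 1 : Nat) : Int) := by omega
      rw [hc, PySem.List.pyGetD_natCast, List.getD_eq_getElem?_getD,
        List.getElem?_append_left (by omega)]
      rw [List.getLast?_eq_getElem?] at hlast
      simp [hlast]
    have happ : pre ++ x :: xs = (pre ++ [x]) ++ xs := by simp
    have hrec := ih (pre ++ [x]) x (by simp) (by simp)
    rw [← happ] at hrec
    have hc1 : (((pre ++ [x]).length : Nat) : Int) = (pre.length : Int) + 1 := by
      simp
    rw [hc1] at hrec
    rw [hcons, List.filter_cons, hget1, hget0, hrec]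
    by_cases hx : x = prev
    · simp [chPos, hx]
    · simp [chPos, hx]

-- ===== VERDICT (by name: the statement is the Claim_ definition above) =====
theorem compress_IxI_spec : Claim_equal_compress_IxI := by
  unfold Claim_equal_compress_IxI
  intro m _ hpre
  unfold Pre_compress_IxI at hpre
  unfold Spec_compress_IxI compress_IxI compress_IxI_alt
  have hline : (PySem.List.pyRange 0 (m.length : Int) 1).foldl
      (fun acc r => acc ++ PySem.List.pyGetD m r []) [] = m.flatten := by
    rw [PySem.List.foldl_pyRange_zero_pyGetD' m [] (fun a r => a ++ r) []]
    rw [foldl_acc_flatten]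
    simp
  have hflat : m.flatMap (fun row => row) = m.flatten := by
    simp [List.flatMap_def]
  simp only [hline, hflat]
  cases h : m.flatten with
  | nil => exact absurd h hpre
  | cons c rest =>
    simp only [PySem.List.pyGet?_zero_cons]
    -- A side
    rw [show ((c :: rest).length : Int) = (((c :: rest).length : Nat) : Int) from rfl]
    rw [PySem.List.foldl_pyRange_zero_pyGetD' (c :: rest) 0 stepA _]
    rw [foldA_eq_gRuns]
    -- B side
    have hfil := filter_range_eq_chPos rest [c] c (by simp) (by simp)
    rw [show ([c] ++ rest : List Int) = c :: rest from rfl,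
      show ((([c] : List Int).length : Nat) : Int) = 1 from rfl] at hfil
    rw [hfil, zip_diff_eq_dffs, dffs_chPos]
    -- both sides
    norm_num [gRuns]
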